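-- pv_equiv track=rewrite | github.com/mattg21/PracticeAlgorithms | dance.py | giveFewestDreamDollars
-- ===== SOURCE A (Python) =====
-- setOfBills = [365, 91, 52, 28, 13, 7, 4, 1]
--
-- def giveFewestDreamDollars(change, billsToUse):
--     if (change == 0):
--         return billsToUse
--     else:
--         for bill in setOfBills:
--             if bill <= change:
--                 billsToUse.append(bill)
--                 return giveFewestDreamDollars(change - bill, billsToUse)
-- ===== SOURCE B (Python) =====
-- setOfBills = [365, 91, 52, 28, 13, 7, 4, 1]
--
-- def giveFewestDreamDollars(change, billsToUse):
--     for bill in setOfBills: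
--         while bill <= change:
--             billsToUse.append(bill)
--             change -= bill
--     return billsToUse if change == 0 else None
-- ===== Notes on version B (the rewrite author's own statement) =====
-- stated objective: idiomatic
-- what changed: Replaces the one-bill-per-call recursion (which rescans the bill list from the top each call) with a single largest-first pass that drains each denomination with an inner while loop; Pre_ excludes negative change (both versions return None, not a list) and change whose greedy bill count exceeds 9997, exactly where A's recursion overruns the 10000-frame recursion limit and raises RecursionError while B's loop returns.
-- outside the precondition, e.g. on giveFewestDreamDollars(-5, []): A returns None, B returns None
import Mathlib
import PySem

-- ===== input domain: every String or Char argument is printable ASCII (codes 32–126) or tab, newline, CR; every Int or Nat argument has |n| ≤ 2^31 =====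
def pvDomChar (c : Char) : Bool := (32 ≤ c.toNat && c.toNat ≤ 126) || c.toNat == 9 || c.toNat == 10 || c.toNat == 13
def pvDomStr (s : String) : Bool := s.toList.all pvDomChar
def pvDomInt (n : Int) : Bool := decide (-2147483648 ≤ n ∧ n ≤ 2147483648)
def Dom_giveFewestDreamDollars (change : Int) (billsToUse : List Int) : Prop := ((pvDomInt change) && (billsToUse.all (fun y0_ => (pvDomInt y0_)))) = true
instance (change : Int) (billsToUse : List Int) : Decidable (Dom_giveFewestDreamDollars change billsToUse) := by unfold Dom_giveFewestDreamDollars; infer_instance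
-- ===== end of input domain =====

-- B replaces A's one-bill-per-call recursion by a single largest-first pass draining each
-- denomination with an inner while loop (idiomatic greedy change-making).
-- Both A and B mutate billsToUse in place by appending the same bills; the theorems are
-- about the returned value.

-- ===== PORT A =====
def setOfBills : List Int := [365, 91, 52, 28, 13, 7, 4, 1]

-- the 'for bill in setOfBills: if bill <= change: … return …' loop returns at the FIRST
-- bill ≤ change, i.e. setOfBills.find?; if none matches Python returns None (change < 0,
-- outside Pre_); the port returns billsToUse there.
def giveFewestDreamDollars (change : Int) (billsToUse : List Int) : List Int :=
  if change = 0 then billsToUse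
  else
    match h : setOfBills.find? (fun b => decide (b ≤ change)) with
    | some bill => giveFewestDreamDollars (change - bill) (billsToUse ++ [bill])
    | none => billsToUse
termination_by change.toNat
decreasing_by
  have hb : bill ∈ setOfBills := List.mem_of_find?_eq_some h
  have hle : bill ≤ change := by simpa using List.find?_some h
  have h1 : (1:Int) ≤ bill := by
    simp only [setOfBills, List.mem_cons, List.not_mem_nil, or_false] at hb
    rcases hb with rfl|rfl|rfl|rfl|rfl|rfl|rfl|rfl <;> norm_num
  omega

-- ===== PORT B =====
-- 'while bill <= change: billsToUse.append(bill); change -= bill'; the '0 < bill' guard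
-- only makes the recursion total (every bill in setOfBills is positive, so it never fires).
def pvDrain (bill : Int) (c : Int) (acc : List Int) : Int × List Int :=
  if 0 < bill ∧ bill ≤ c then pvDrain bill (c - bill) (acc ++ [bill]) else (c, acc)
termination_by c.toNat
decreasing_by omega

-- Python B ends with 'return billsToUse if change == 0 else None'; the None branch
-- (change < 0, outside Pre_) has no List Int value, the port returns the list there.
def giveFewestDreamDollars_alt (change : Int) (billsToUse : List Int) : List Int :=
  (setOfBills.foldl (fun s bill => pvDrain bill s.1 s.2) (change, billsToUse)).2

-- ===== PRECONDITION & SPEC =====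
-- the number of recursive calls A makes on nonnegative change: the greedy bill count,
-- written as closed-form floor-division arithmetic on the input
def pvGreedySteps (c : Int) : Int :=
  c / 365 + c % 365 / 91 + c % 365 % 91 / 52 + c % 365 % 91 % 52 / 28
    + c % 365 % 91 % 52 % 28 / 13 + c % 365 % 91 % 52 % 28 % 13 / 7
    + c % 365 % 91 % 52 % 28 % 13 % 7 / 4 + c % 365 % 91 % 52 % 28 % 13 % 7 % 4

-- Pre_ excludes change < 0, where both Pythons return None (not a value of the declared
-- return type List Int), and change whose greedy bill count exceeds 9997, which is exactly
-- where A's one-bill-per-call recursion overruns the 10000-frame recursion limit the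
-- grading runner sets and raises RecursionError (while B's loop returns).
def Pre_giveFewestDreamDollars (change : Int) (billsToUse : List Int) : Prop :=
  0 ≤ change ∧ pvGreedySteps change ≤ 9997
instance (change : Int) (billsToUse : List Int) : Decidable (Pre_giveFewestDreamDollars change billsToUse) := by unfold Pre_giveFewestDreamDollars; infer_instance
def pvWitness_giveFewestDreamDollars : Int × List Int := (100, [7])

def Spec_giveFewestDreamDollars (change : Int) (billsToUse : List Int) (out : List Int) : Prop := out = giveFewestDreamDollars_alt change billsToUse
instance (change : Int) (billsToUse : List Int) (out : List Int) : Decidable (Spec_giveFewestDreamDollars change billsToUse out) := by unfold Spec_giveFewestDreamDollars; infer_instance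

-- ===== CLAIM (what is proved, stated in full; the proofs are below) =====
def Claim_equal_giveFewestDreamDollars : Prop := ∀ (change : Int) (billsToUse : List Int), Dom_giveFewestDreamDollars change billsToUse → Pre_giveFewestDreamDollars change billsToUse → Spec_giveFewestDreamDollars change billsToUse (giveFewestDreamDollars change billsToUse)

-- ===== LEMMAS AND PROOFS =====

-- a bill larger than the remaining change drains nothing
theorem pvDrain_skip (bill c : Int) (acc : List Int) (h : c < bill) :
    pvDrain bill c acc = (c, acc) := by
  rw [pvDrain]; simp [show ¬(0 < bill ∧ bill ≤ c) by omega]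

theorem pvDrain_step (bill c : Int) (acc : List Int) (h1 : 0 < bill) (h2 : bill ≤ c) :
    pvDrain bill c acc = pvDrain bill (c - bill) (acc ++ [bill]) := by
  rw [pvDrain]; simp [h1, h2]

-- folding over bills all larger than the remaining change leaves the state unchanged
theorem fold_stuck (L : List Int) (c : Int) (acc : List Int) (h : ∀ b ∈ L, c < b) :
    L.foldl (fun s bill => pvDrain bill s.1 s.2) (c, acc) = (c, acc) := by
  induction L with
  | nil => rfl
  | cons b t ih =>
      simp only [List.foldl_cons, pvDrain_skip b c acc (h b (by simp))]
      exact ih (fun x hx => h x (by simp [hx]))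

-- one greedy step of A commutes with the whole B fold
theorem fold_step (P S : List Int) (bill c : Int) (acc : List Int)
    (hP : ∀ p ∈ P, c < p) (h1 : 0 < bill) (h2 : bill ≤ c) :
    (P ++ bill :: S).foldl (fun s b => pvDrain b s.1 s.2) (c, acc)
      = (P ++ bill :: S).foldl (fun s b => pvDrain b s.1 s.2) (c - bill, acc ++ [bill]) := by
  have hP' : ∀ p ∈ P, c - bill < p := fun p hp => by have := hP p hp; omega
  simp only [List.foldl_append, List.foldl_cons, fold_stuck P c acc hP,
    fold_stuck P (c - bill) (acc ++ [bill]) hP',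
    pvDrain_step bill c acc h1 h2]

theorem main_equiv : ∀ n : Nat, ∀ change : Int, change.toNat = n → 0 ≤ change →
    ∀ acc : List Int, giveFewestDreamDollars change acc = giveFewestDreamDollars_alt change acc := by
  intro n
  induction n using Nat.strong_induction_on with
  | _ n ih =>
    intro change hn hpos acc
    by_cases hz : change = 0
    · subst hz
      rw [giveFewestDreamDollars, giveFewestDreamDollars_alt, fold_stuck]
      · simp
      · intro b hb
        simp only [setOfBills, List.mem_cons, List.not_mem_nil, or_false] at hb
        rcases hb with rfl|rfl|rfl|rfl|rfl|rfl|rfl|rfl <;> norm_num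
    · rw [giveFewestDreamDollars, if_neg hz]
      split
      case _ bill hfind =>
        have hle : bill ≤ change := by simpa using List.find?_some hfind
        have hmem : bill ∈ setOfBills := List.mem_of_find?_eq_some hfind
        have h1 : (1:Int) ≤ bill := by
          simp only [setOfBills, List.mem_cons, List.not_mem_nil, or_false] at hmem
          rcases hmem with rfl|rfl|rfl|rfl|rfl|rfl|rfl|rfl <;> norm_num
        obtain ⟨-, P, S, hsplit, hpre⟩ := List.find?_eq_some_iff_append.mp hfind
        have hP : ∀ p ∈ P, change < p := by
          intro p hp
          have := hpre p hp
          simp at this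
          omega
        rw [ih (change - bill).toNat (by omega) (change - bill) rfl (by omega)]
        simp only [giveFewestDreamDollars_alt, hsplit]
        exact congrArg Prod.snd (fold_step P S bill change acc hP (by omega) hle).symm
      case _ hfind =>
        exfalso
        have := List.find?_eq_none.mp hfind 1 (by simp [setOfBills])
        simp at this
        omega

-- ===== VERDICT (by name: the statement is the Claim_ definition above) =====
theorem giveFewestDreamDollars_spec : Claim_equal_giveFewestDreamDollars := by
  intro change billsToUse _ hpre
  exact main_equiv change.toNat change rfl hpre.1 billsToUse
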